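-- pv_equiv track=rewrite | github.com/ndeimler99/pombeTARPON | bin/create_consensus_seq.py | get_max_nucl
-- ===== SOURCE A (Python) =====
-- def get_max_nucl(nucl_dict, read_count):
--
--     nucl = max(nucl_dict, key=nucl_dict.get)
--     nucl_value = max(nucl_dict.values())
--
--     if nucl_value > read_count:
--         max_val = 0
--         for nuc in nucl_dict:
--             if nucl_dict[nuc] > max_val and nuc != '-':
--                 max_val = nucl_dict[nuc]
--                 nucl = nuc
--                 nucl_value = nucl_dict[nuc]
--     return nucl, nucl_value
-- ===== SOURCE B (Python) =====
-- def get_max_nucl(nucl_dict, read_count):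
--     best = None            # (key, value) with the largest value; first occurrence wins
--     ng_key, ng_val = None, 0   # best non-gap candidate with value > 0; first occurrence wins
--     for k, v in nucl_dict.items():
--         if best is None or v > best[1]:
--             best = (k, v)
--         if k != '-' and v > ng_val:
--             ng_key, ng_val = k, v
--     if best is None:
--         raise ValueError('get_max_nucl: empty nucleotide dict')
--     if best[1] > read_count and ng_key is not None:
--         return ng_key, ng_val
--     return best
-- ===== Notes on version B (the rewrite author's own statement) =====
-- stated objective: alternative
-- what changed: A makes three passes (max over keys with a lookup key-function, max over values, then a lookup loop for the best non-gap); B is one pass over items() carrying two running candidates (overall argmax and best non-gap with value>0) and combines them at the end.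
import Mathlib
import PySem

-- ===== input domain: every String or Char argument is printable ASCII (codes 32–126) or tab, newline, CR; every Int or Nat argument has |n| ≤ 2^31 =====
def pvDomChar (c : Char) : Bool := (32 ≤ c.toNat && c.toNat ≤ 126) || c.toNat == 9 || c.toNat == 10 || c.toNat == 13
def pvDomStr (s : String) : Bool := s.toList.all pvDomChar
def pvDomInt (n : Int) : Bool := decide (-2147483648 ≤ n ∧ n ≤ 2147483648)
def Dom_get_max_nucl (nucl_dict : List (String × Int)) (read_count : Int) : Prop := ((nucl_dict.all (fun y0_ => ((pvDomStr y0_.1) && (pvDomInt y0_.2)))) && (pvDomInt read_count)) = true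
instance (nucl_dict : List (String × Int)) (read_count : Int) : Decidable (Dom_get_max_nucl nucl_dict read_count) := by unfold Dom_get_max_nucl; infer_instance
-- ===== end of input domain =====

-- B replaces A's three passes (two max() calls plus a lookup loop) by one fold that carries both candidates; objective: alternative single-pass decomposition.


-- ===== PORT A =====
-- nucl_dict.get(k); every key it is applied to comes from nucl_dict itself, so the
-- lookup always succeeds and getD's default is never used (exact there).
def pyDictGet (nucl_dict : List (String × Int)) (k : String) : Int :=
  (PySem.Dict.mk nucl_dict).getD k 0

def get_max_nucl (nucl_dict : List (String × Int)) (read_count : Int) : String × Int :=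
  -- nucl = max(nucl_dict, key=nucl_dict.get)
  match PySem.List.max? (nucl_dict.map Prod.fst) (fun k => pyDictGet nucl_dict k) with
  | none => ("", 0)  -- unreachable: Python raises ValueError on the empty dict (outside Pre_)
  | some nucl =>
    -- nucl_value = max(nucl_dict.values())
    match PySem.List.max? (nucl_dict.map Prod.snd) (fun v => v) with
    | none => ("", 0)  -- unreachable likewise
    | some nucl_value =>
      if nucl_value > read_count then
        -- for nuc in nucl_dict: if nucl_dict[nuc] > max_val and nuc != '-': ...
        let st := (nucl_dict.map Prod.fst).foldl
          (fun (s : Int × String × Int) nuc =>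
            if pyDictGet nucl_dict nuc > s.1 ∧ nuc ≠ "-" then
              (pyDictGet nucl_dict nuc, nuc, pyDictGet nucl_dict nuc)
            else s)
          (0, nucl, nucl_value)
        (st.2.1, st.2.2)
      else (nucl, nucl_value)

-- ===== PORT B =====
def get_max_nucl_alt (nucl_dict : List (String × Int)) (read_count : Int) : String × Int :=
  -- one pass over items: best = running (key,value) argmax (first wins),
  -- (ng_key, ng_val) = running best non-gap candidate with value > 0 (first wins)
  let st := nucl_dict.foldl
    (fun (s : Option (String × Int) × Option String × Int) kv =>
      let best := match s.1 with
        | none => some kv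
        | some b => if kv.2 > b.2 then some kv else some b
      let ng := if kv.1 ≠ "-" ∧ kv.2 > s.2.2 then (some kv.1, kv.2) else s.2
      (best, ng))
    (none, none, 0)
  match st.1 with
  | none => ("", 0)  -- best is None: Source B raises ValueError on the empty dict (outside Pre_)
  | some b =>
    if b.2 > read_count then
      match st.2.1 with
      | some k => (k, st.2.2)
      | none => b
    else b

-- ===== PRECONDITION & SPEC =====
-- Pre_ excludes the empty dict, on which both Pythons raise ValueError, and association
-- lists with duplicate keys, which a Python dict argument can never present.
def Pre_get_max_nucl (nucl_dict : List (String × Int)) (read_count : Int) : Prop :=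
  nucl_dict ≠ [] ∧ (nucl_dict.map Prod.fst).Nodup
instance (nucl_dict : List (String × Int)) (read_count : Int) : Decidable (Pre_get_max_nucl nucl_dict read_count) := by unfold Pre_get_max_nucl; infer_instance

def pvWitness_get_max_nucl : (List (String × Int)) × Int := ([("A", 3), ("-", 5), ("C", 1)], 1)

def Spec_get_max_nucl (nucl_dict : List (String × Int)) (read_count : Int) (out : String × Int) : Prop := out = get_max_nucl_alt nucl_dict read_count
instance (nucl_dict : List (String × Int)) (read_count : Int) (out : String × Int) : Decidable (Spec_get_max_nucl nucl_dict read_count out) := by unfold Spec_get_max_nucl; infer_instance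

-- ===== CLAIM (what is proved, stated in full; the proofs are below) =====
def Claim_equal_get_max_nucl : Prop := ∀ (nucl_dict : List (String × Int)) (read_count : Int), Dom_get_max_nucl nucl_dict read_count → Pre_get_max_nucl nucl_dict read_count → Spec_get_max_nucl nucl_dict read_count (get_max_nucl nucl_dict read_count)

-- ===== LEMMAS AND PROOFS =====

-- The step of PySem.List.max? (named so folds over mapped lists can be rewritten; max?_eq_foldl_myStep is rfl).
def myStep {α κ : Type} [LT κ] [DecidableLT κ] (key : α → κ) (acc : Option α) (x : α) : Option α :=
  match acc with
  | none => some x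
  | some m => if key m < key x then some x else some m

theorem max?_eq_foldl_myStep {α κ : Type} [LT κ] [DecidableLT κ] (xs : List α) (key : α → κ) :
    PySem.List.max? xs key = xs.foldl (myStep key) none := rfl

-- With no duplicate keys, the dict lookup of a key of a pair of the list returns that pair's value.
theorem pyDictGet_eq : ∀ {l : List (String × Int)}, (l.map Prod.fst).Nodup →
    ∀ kv ∈ l, pyDictGet l kv.1 = kv.2 := by
  intro l
  induction l with
  | nil => intro _ kv hm; cases hm
  | cons p t ih =>
    intro hnd kv hm
    simp only [List.map_cons, List.nodup_cons] at hnd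
    rcases List.mem_cons.mp hm with hm | hm
    · subst hm
      simp [pyDictGet, PySem.Dict.getD, PySem.Dict.get?]
    · have hne : ¬ (p.1 == kv.1) = true := by
        intro h
        exact hnd.1 (by
          have : p.1 = kv.1 := by simpa using h
          exact this ▸ (List.mem_map_of_mem hm))
      have := ih hnd.2 kv hm
      simpa [pyDictGet, PySem.Dict.getD, PySem.Dict.get?, hne] using this

-- B's running argmax, as a step function (identical to the fold inside get_max_nucl_alt's first component).
def bStep (s : Option (String × Int)) (kv : String × Int) : Option (String × Int) :=
  match s with
  | none => some kv
  | some b => if kv.2 > b.2 then some kv else some b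

-- A's argmax over keys by lookup tracks B's argmax over pairs (and the tracked pair remains lookup-correct).
theorem argmax_keys_eq (g : String → Int) :
    ∀ (l : List (String × Int)) (acc : Option (String × Int)),
    (∀ kv ∈ l, g kv.1 = kv.2) → (∀ p, acc = some p → g p.1 = p.2) →
    l.foldl (fun (o : Option String) kv => myStep g o kv.1) (acc.map Prod.fst)
      = (l.foldl bStep acc).map Prod.fst
    ∧ (∀ p, l.foldl bStep acc = some p → g p.1 = p.2) := by
  intro l
  induction l with
  | nil => intro acc _ hacc; exact ⟨rfl, fun p hp => hacc p hp⟩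
  | cons kv t ih =>
    intro acc hg hacc
    have hghd : g kv.1 = kv.2 := hg kv (by simp)
    have hgt : ∀ x ∈ t, g x.1 = x.2 := fun x hx => hg x (by simp [hx])
    cases acc with
    | none =>
      simpa [bStep, myStep] using ih (some kv) hgt (by rintro p ⟨rfl⟩; exact hghd)
    | some p =>
      have hp : g p.1 = p.2 := hacc p rfl
      by_cases h : p.2 < kv.2
      · have hs : myStep g (some p.1) kv.1 = some kv.1 := by
          simp [myStep, hp, hghd, h]
        simp only [List.foldl_cons, bStep, Option.map_some, hs, if_pos h, gt_iff_lt]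
        simpa using ih (some kv) hgt (by rintro q ⟨rfl⟩; exact hghd)
      · have hs : myStep g (some p.1) kv.1 = some p.1 := by
          simp [myStep, hp, hghd, h]
        simp only [List.foldl_cons, bStep, Option.map_some, hs, if_neg h, gt_iff_lt]
        simpa using ih (some p) hgt (by rintro q ⟨rfl⟩; exact hp)

-- A's running max over values tracks the value component of B's argmax over pairs.
theorem max_values_eq :
    ∀ (l : List (String × Int)) (acc : Option (String × Int)),
    l.foldl (fun (o : Option Int) kv => myStep (fun v : Int => v) o kv.2) (acc.map Prod.snd)
      = (l.foldl bStep acc).map Prod.snd := by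
  intro l
  induction l with
  | nil => intro acc; rfl
  | cons kv t ih =>
    intro acc
    cases acc with
    | none => simpa [bStep, myStep] using ih (some kv)
    | some p =>
      by_cases h : p.2 < kv.2
      · have hs : myStep (fun v : Int => v) (some p.2) kv.2 = some kv.2 := by
          simp [myStep, h]
        simp only [List.foldl_cons, bStep, Option.map_some, hs, if_pos h, gt_iff_lt]
        simpa using ih (some kv)
      · have hs : myStep (fun v : Int => v) (some p.2) kv.2 = some p.2 := by
          simp [myStep, h]
        simp only [List.foldl_cons, bStep, Option.map_some, hs, if_neg h, gt_iff_lt]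
        simpa using ih (some p)

-- B's non-gap step, as in get_max_nucl_alt's second component.
def ngStep (t : Option String × Int) (kv : String × Int) : Option String × Int :=
  if kv.1 ≠ "-" ∧ kv.2 > t.2 then (some kv.1, kv.2) else t

-- Relation between A's (max_val, nucl, nucl_value) state and B's (ng_key, ng_val) state.
def NgRel (nv0 : String × Int) (sA : Int × String × Int) (sB : Option String × Int) : Prop :=
  sA.1 = sB.2 ∧ ((sB.1 = none ∧ sA.2 = nv0) ∨ (∃ k, sB.1 = some k ∧ sA.2 = (k, sB.2)))

theorem ng_loop_rel (nv0 : String × Int) :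
    ∀ (l : List (String × Int)) (sA : Int × String × Int) (sB : Option String × Int),
    NgRel nv0 sA sB →
    NgRel nv0
      (l.foldl (fun (s : Int × String × Int) kv =>
        if kv.2 > s.1 ∧ kv.1 ≠ "-" then (kv.2, kv.1, kv.2) else s) sA)
      (l.foldl ngStep sB) := by
  intro l
  induction l with
  | nil => intro sA sB h; exact h
  | cons kv t ih =>
    intro sA sB h
    obtain ⟨h1, h2⟩ := h
    by_cases hc : kv.1 ≠ "-" ∧ kv.2 > sB.2
    · have hcA : kv.2 > sA.1 ∧ kv.1 ≠ "-" := ⟨h1 ▸ hc.2, hc.1⟩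
      simp only [List.foldl_cons, ngStep, if_pos hc, if_pos hcA]
      exact ih _ _ ⟨rfl, Or.inr ⟨kv.1, rfl, rfl⟩⟩
    · have hcA : ¬ (kv.2 > sA.1 ∧ kv.1 ≠ "-") := by
        rw [h1]; tauto
      simp only [List.foldl_cons, ngStep, if_neg hc, if_neg hcA]
      exact ih _ _ ⟨h1, h2⟩

-- B's joint fold splits into the two independent folds bStep / ngStep.
theorem alt_fold_split (l : List (String × Int)) :
    l.foldl
      (fun (s : Option (String × Int) × Option String × Int) kv =>
        (bStep s.1 kv, ngStep s.2 kv))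
      (none, none, 0)
      = (l.foldl bStep none, l.foldl ngStep (none, 0)) := by
  exact PySem.List.foldl_prod_mk bStep ngStep l none (none, 0)

-- A fold of bStep started from some pair never returns none.
theorem bfold_some (t : List (String × Int)) :
    ∀ p : String × Int, ∃ q, t.foldl bStep (some p) = some q := by
  induction t with
  | nil => intro p; exact ⟨p, rfl⟩
  | cons kv t ih =>
    intro p
    by_cases h : kv.2 > p.2
    · simpa [bStep, h] using ih kv
    · simpa [bStep, h] using ih p

-- ===== VERDICT (by name: the statement is the Claim_ definition above) =====
theorem get_max_nucl_spec : Claim_equal_get_max_nucl := by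
  intro l rc _ hpre
  obtain ⟨hne, hnd⟩ := hpre
  unfold Spec_get_max_nucl get_max_nucl get_max_nucl_alt
  rw [show (fun (s : Option (String × Int) × Option String × Int) (kv : String × Int) =>
        let best := match s.1 with
          | none => some kv
          | some b => if kv.2 > b.2 then some kv else some b
        let ng := if kv.1 ≠ "-" ∧ kv.2 > s.2.2 then (some kv.1, kv.2) else s.2
        (best, ng))
      = (fun s kv => (bStep s.1 kv, ngStep s.2 kv)) from rfl]
  rw [alt_fold_split]
  obtain ⟨p, hp⟩ : ∃ p, l.foldl bStep none = some p := by
    cases l with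
    | nil => exact absurd rfl hne
    | cons kv t => simpa [bStep] using bfold_some t kv
  have hg : ∀ kv ∈ l, pyDictGet l kv.1 = kv.2 := pyDictGet_eq hnd
  have hA1 : PySem.List.max? (l.map Prod.fst) (fun k => pyDictGet l k) = some p.1 := by
    rw [max?_eq_foldl_myStep, List.foldl_map]
    have h := (argmax_keys_eq (fun k => pyDictGet l k) l none (by simpa using hg) (by simp)).1
    rw [hp] at h
    simpa using h
  have hA2 : PySem.List.max? (l.map Prod.snd) (fun v => (v : Int)) = some p.2 := by
    rw [max?_eq_foldl_myStep, List.foldl_map]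
    have h := max_values_eq l none
    rw [hp] at h
    simpa using h
  rw [hA1, hA2, hp]
  simp only []
  by_cases hrc : p.2 > rc
  · simp only [if_pos hrc]
    rw [List.foldl_map]
    have hcongr := PySem.List.foldl_congr_mem (l := l) (init := ((0 : Int), p.1, p.2))
        (f := fun (s : Int × String × Int) kv =>
          if pyDictGet l kv.1 > s.1 ∧ kv.1 ≠ "-" then (pyDictGet l kv.1, kv.1, pyDictGet l kv.1) else s)
        (g := fun (s : Int × String × Int) kv =>
          if kv.2 > s.1 ∧ kv.1 ≠ "-" then (kv.2, kv.1, kv.2) else s)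
        (fun acc kv hkv => by simp [hg kv hkv])
    rw [hcongr]
    have hrel := ng_loop_rel (p.1, p.2) l (0, p.1, p.2) (none, 0) ⟨rfl, Or.inl ⟨rfl, rfl⟩⟩
    obtain ⟨e1, hcase⟩ := hrel
    rcases hcase with ⟨hn, hv⟩ | ⟨k, hk, hv⟩
    · rw [hn, hv]
    · rw [hk, hv]
  · simp only [if_neg hrc]
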